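-- pv_equiv track=rewrite | github.com/ontologymerging/NoisyOntologyMerging | MergingNoisyOntology_Semantic-Based/ModelBasedMerging.py | Collecting_AtomicConceptsFrom_OneSources
-- ===== SOURCE A (Python) =====
-- def Collecting_AtomicConceptsFrom_OneSources(OneSource):
--     ListOfAtomicConcepts=[]
--     #Relation=[["->"],["<-"],["="]]
--     Relation = ["->","<-","="]
--     for eachAxiom in OneSource:
--         for eachConcept in eachAxiom:
--             if eachConcept not in Relation:
--                 ListOfAtomicConcepts.append(eachConcept)
--     ListOfAtomicConcepts = list(dict.fromkeys(ListOfAtomicConcepts))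
--     return ListOfAtomicConcepts
-- ===== SOURCE B (Python) =====
-- def Collecting_AtomicConceptsFrom_OneSources(OneSource):
--     # Flatten in a single comprehension, filtering out relation symbols; then
--     # deduplicate by a sieve: repeatedly take the first remaining token and
--     # erase all of its later duplicates (no seen-set, no dict needed).
--     tokens = [c for ax in OneSource for c in ax if c not in ("->", "<-", "=")]
--     result = []
--     while tokens:
--         head = tokens[0]
--         result.append(head)
--         tokens = [y for y in tokens[1:] if y != head]
--     return result
-- ===== Notes on version B (the rewrite author's own statement) =====
-- stated objective: alternative
-- what changed: Replaces A's nested accumulation loop plus dict.fromkeys dedup with a flattening comprehension followed by a sieve: repeatedly take the first remaining token into the result and erase all its later duplicates from the tail, so order-preserving dedup is done without any dict or seen-set.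
import Mathlib
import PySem

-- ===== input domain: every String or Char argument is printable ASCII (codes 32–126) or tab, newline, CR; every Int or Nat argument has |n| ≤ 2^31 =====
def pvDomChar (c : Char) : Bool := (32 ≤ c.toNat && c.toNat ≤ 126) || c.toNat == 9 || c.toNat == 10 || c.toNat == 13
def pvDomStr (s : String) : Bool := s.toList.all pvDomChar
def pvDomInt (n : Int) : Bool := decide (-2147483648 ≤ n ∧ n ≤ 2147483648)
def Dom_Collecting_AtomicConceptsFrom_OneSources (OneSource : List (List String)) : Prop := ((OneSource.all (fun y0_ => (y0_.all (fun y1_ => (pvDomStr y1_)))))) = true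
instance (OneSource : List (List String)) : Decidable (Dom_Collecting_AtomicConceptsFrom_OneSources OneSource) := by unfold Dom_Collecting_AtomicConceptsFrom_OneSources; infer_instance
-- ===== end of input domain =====

-- B replaces A's collect-then-dict.fromkeys dedup with a flatten comprehension and a
-- sieve (take first remaining token, erase its later duplicates) — alternative decomposition.


-- ===== PORT A =====
-- list(dict.fromkeys(xs)): keep the first occurrence of each element, in order.
-- Exact: dict insertion keeps the first position of a key; later re-insertions overwrite in place.
def pvFromKeys : List String → List String → List String
  | [], _ => []
  | x :: xs, seen =>
      if seen.contains x then pvFromKeys xs seen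
      else x :: pvFromKeys xs (seen ++ [x])

def Collecting_AtomicConceptsFrom_OneSources (OneSource : List (List String)) : List String :=
  let Relation : List String := ["->", "<-", "="]
  let ListOfAtomicConcepts :=
    OneSource.foldl (fun acc eachAxiom =>
      eachAxiom.foldl (fun acc eachConcept =>
        if Relation.contains eachConcept then acc else acc ++ [eachConcept]) acc) []
  pvFromKeys ListOfAtomicConcepts []

-- ===== PORT B =====
-- Source B's while loop: each iteration moves tokens[0] to the result and rebuilds tokens as
-- the tail with that head's duplicates filtered out; ported as the equivalent recursion
-- on the shrinking token list.
def pvSieve : List String → List String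
  | [] => []
  | x :: xs => x :: pvSieve (xs.filter (fun y => y ≠ x))
termination_by xs => xs.length
decreasing_by
  have h := List.length_filter_le (fun x_1 => decide ((x_1 : {y // y ∈ xs}).1 ≠ x)) xs.attach
  simp at h ⊢; omega

def Collecting_AtomicConceptsFrom_OneSources_alt (OneSource : List (List String)) : List String :=
  pvSieve (OneSource.flatMap (fun ax =>
    ax.filter (fun c => !(["->", "<-", "="] : List String).contains c)))

-- ===== PRECONDITION & SPEC =====
def Spec_Collecting_AtomicConceptsFrom_OneSources (OneSource : List (List String)) (out : List String) : Prop := out = Collecting_AtomicConceptsFrom_OneSources_alt OneSource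
instance (OneSource : List (List String)) (out : List String) : Decidable (Spec_Collecting_AtomicConceptsFrom_OneSources OneSource out) := by unfold Spec_Collecting_AtomicConceptsFrom_OneSources; infer_instance

-- ===== CLAIM (what is proved, stated in full; the proofs are below) =====
def Claim_equal_Collecting_AtomicConceptsFrom_OneSources : Prop := ∀ (OneSource : List (List String)), Dom_Collecting_AtomicConceptsFrom_OneSources OneSource → Spec_Collecting_AtomicConceptsFrom_OneSources OneSource (Collecting_AtomicConceptsFrom_OneSources OneSource)

-- ===== LEMMAS AND PROOFS =====

-- A's inner append-if loop is filtering.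
theorem foldA_filter (p : String → Bool) (xs acc : List String) :
    xs.foldl (fun a c => if p c then a else a ++ [c]) acc
      = acc ++ xs.filter (fun c => !p c) := by
  induction xs generalizing acc with
  | nil => simp
  | cons x xs ih =>
      by_cases h : p x = true <;> simp [List.foldl, h, ih, List.filter]

-- Folding an inner fold over the rows is folding over the flattened list.
theorem foldl_rows {σ α : Type} (f : σ → α → σ)
    (rows : List (List α)) (acc : σ) :
    rows.foldl (fun a row => row.foldl f a) acc = rows.flatten.foldl f acc := by
  induction rows generalizing acc with
  | nil => rfl
  | cons r rs ih => simp [List.foldl, ih, List.foldl_append]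

-- pvSieve's equations (it recurses on a filtered tail, so they are proved, not definitional).
theorem pvSieve_nil : pvSieve [] = [] := by simp [pvSieve]

theorem pvSieve_cons (x : String) (xs : List String) :
    pvSieve (x :: xs) = x :: pvSieve (xs.filter (fun y => y ≠ x)) := by simp [pvSieve]

-- First-occurrence dedup with a seen list equals the sieve on the tokens not yet seen:
-- the sieve's head is the first unseen token, and erasing its duplicates from the tail
-- is exactly adding it to the seen list.
theorem fromKeys_sieve (xs seen : List String) :
    pvFromKeys xs seen = pvSieve (xs.filter (fun y => y ∉ seen)) := by
  induction xs generalizing seen with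
  | nil => simp [pvFromKeys, pvSieve_nil]
  | cons x xs ih =>
      rw [pvFromKeys]
      by_cases h : x ∈ seen
      · rw [if_pos (by simpa using h), ih]
        congr 1
        simp [h]
      · rw [if_neg (by simpa using h), ih (seen ++ [x])]
        rw [show (x :: xs).filter (fun y => decide (y ∉ seen))
              = x :: xs.filter (fun y => decide (y ∉ seen)) from by
            simp [h]]
        rw [pvSieve_cons, List.filter_filter]
        refine congrArg (fun t => x :: pvSieve t) (List.filter_congr ?_)
        intro y _
        by_cases hy : y = x <;> by_cases hs : y ∈ seen <;>
          simp [hy, hs, List.mem_append]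

-- ===== VERDICT (by name: the statement is the Claim_ definition above) =====
theorem Collecting_AtomicConceptsFrom_OneSources_spec : Claim_equal_Collecting_AtomicConceptsFrom_OneSources := by
  intro OneSource _
  unfold Spec_Collecting_AtomicConceptsFrom_OneSources
  unfold Collecting_AtomicConceptsFrom_OneSources Collecting_AtomicConceptsFrom_OneSources_alt
  dsimp only
  rw [foldl_rows, foldA_filter, fromKeys_sieve]
  simp [List.flatMap_def, List.filter_flatten, Function.comp_def]
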